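-- pv_equiv track=rewrite | github.com/PRITHIVSAKTHIUR/BERT-UNCASED | overlap.py | unoverlap_list
-- ===== SOURCE A (Python) =====
-- def get_overlap_length(left: str, right: str):
--     good_length, overlap = 0, ""
--     for i in range(min(len(left), len(right))):
--         if left[-i:] == right[:i]:
--             good_length = i
--             overlap = left[-i:]
--     return good_length, overlap
--
-- def get_overlap_list(strings):
--     """
--     Returns a list of tuples of the form (overlap_length, overlap), one tuple for each pair of strings in the input list.
--     """
--     overlaps = []
--     for i in range(len(strings) - 1):
--         overlaps.append(get_overlap_length(strings[i], strings[i+1]))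
--     return overlaps
--
-- def unoverlap_list(strings):
--     """
--     Returns a list of tuples of the form (content, is_overlap), where is_overlap is a boolean indicating whether the content is an overlap or not.
--     """
--     overlaps = get_overlap_list(strings)
--     new_list = []
--     for index, string in enumerate(strings):
--         # Add the last overlap when needed
--         if index > 0 and len(overlaps[index-1][1]) > 0:
--             new_list.append((overlaps[index-1][1], True))
--
--         # prune the string with left and right overlaps
--         left_overlap_length, right_overlap_length = 0, 0
--         if index > 0:
--             left_overlap_length = overlaps[index-1][0]
--         if index < len(strings) - 1:
--             right_overlap_length = overlaps[index][0]
--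
--         new_list.append((string[left_overlap_length:len(string)-right_overlap_length], False))
--     return new_list
-- ===== SOURCE B (Python) =====
-- def _kmp_overlap(left, right):
--     # longest k <= min(len)-1 with left.endswith(right[:k]), via the KMP prefix
--     # function of right + '\x00' + left, then capped by following the border chain
--     s = right + "\x00" + left
--     pi = [0] * len(s)
--     for t in range(1, len(s)):
--         k = pi[t - 1]
--         while k > 0 and s[t] != s[k]:
--             k = pi[k - 1]
--         if s[t] == s[k]:
--             k += 1
--         pi[t] = k
--     k = pi[-1]
--     cap = min(len(left), len(right)) - 1
--     while k > cap and k > 0: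
--         k = pi[k - 1]
--     return k
--
-- def unoverlap_list(strings):
--     n = len(strings)
--     ks = [_kmp_overlap(strings[i], strings[i + 1]) for i in range(n - 1)]
--
--     def pieces(idx):
--         s = strings[idx]
--         lk = ks[idx - 1] if idx > 0 else 0
--         rk = ks[idx] if idx < n - 1 else 0
--         head = [(s[:lk], True)] if lk > 0 else []
--         return head + [(s[lk:len(s) - rk], False)]
--
--     return [p for idx in range(n) for p in pieces(idx)]
-- ===== Notes on version B (the rewrite author's own statement) =====
-- stated objective: alternative
-- what changed: Each adjacent overlap is computed by building the KMP prefix-function of right + '\x00' + left and walking the border chain down to the min(len)-1 cap, instead of A's scan over all candidate lengths that compares a fresh pair of slices at every length; the output is then assembled as a flat comprehension of per-index piece lists instead of A's conditional appends inside an enumerate loop.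
import Mathlib
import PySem

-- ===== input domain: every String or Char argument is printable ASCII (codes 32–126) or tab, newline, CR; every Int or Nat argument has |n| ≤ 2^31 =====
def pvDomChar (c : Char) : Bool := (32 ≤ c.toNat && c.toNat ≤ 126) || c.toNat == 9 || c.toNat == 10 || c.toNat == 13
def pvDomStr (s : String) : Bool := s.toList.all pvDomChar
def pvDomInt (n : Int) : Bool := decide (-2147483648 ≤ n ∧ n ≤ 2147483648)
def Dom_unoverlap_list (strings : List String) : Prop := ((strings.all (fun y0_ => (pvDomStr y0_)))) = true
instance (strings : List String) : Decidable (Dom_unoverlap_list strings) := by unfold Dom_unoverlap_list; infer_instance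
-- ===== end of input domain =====

-- B finds each adjacent overlap with the KMP prefix function of right+'\x00'+left
-- (capped by following the border chain) instead of A's per-length slice scan: a genuinely
-- different algorithm of a different complexity class per pair (alternative; not measured faster
-- on the generated inputs, whose strings are short).


-- ===== PORT A =====

def get_overlap_length (left right : String) : Int × String :=
  (PySem.List.pyRange 0 (min (PySem.Str.len left) (PySem.Str.len right)) 1).foldl
    (fun st i =>
      if PySem.Str.slice left (some (-i)) none == PySem.Str.slice right none (some i)
      then (i, PySem.Str.slice left (some (-i)) none)
      else st)
    (0, "")


def get_overlap_list (strings : List String) : List (Int × String) :=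
  (PySem.List.pyRange 0 (PySem.List.len strings - 1) 1).foldl
    (fun acc i =>
      acc ++ [get_overlap_length (PySem.List.pyGetD strings i "") (PySem.List.pyGetD strings (i + 1) "")])
    []


def unoverlap_list (strings : List String) : List (String × Bool) :=
  let overlaps := get_overlap_list strings
  (PySem.List.enumerate strings).foldl
    (fun new_list p =>
      let nl1 := if p.1 > 0 ∧ PySem.Str.len ((PySem.List.pyGetD overlaps (p.1 - 1) (0, "")).2) > 0
                 then new_list ++ [((PySem.List.pyGetD overlaps (p.1 - 1) (0, "")).2, true)]
                 else new_list
      let lk := if p.1 > 0 then (PySem.List.pyGetD overlaps (p.1 - 1) (0, "")).1 else 0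
      let rk := if p.1 < PySem.List.len strings - 1 then (PySem.List.pyGetD overlaps p.1 (0, "")).1 else 0
      nl1 ++ [(PySem.Str.slice p.2 (some lk) (some (PySem.Str.len p.2 - rk)), false)])
    []


-- ===== PORT B =====

-- the `while k > 0 and s[t] != s[k]: k = pi[k-1]` loop; fuel only makes it total
def kmpShift (pi : List Nat) (s : List Char) (t : Nat) : Nat → Nat → Nat
  | 0, k => k
  | fuel + 1, k =>
      if 0 < k ∧ ¬ (s.getD t ' ' = s.getD k ' ')
      then kmpShift pi s t fuel (pi.getD (k - 1) 0)
      else k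

-- one iteration of the `for t in range(1, len(s))` body (t = 0 is the initial pi[0] = 0)
def kmpStep (s : List Char) (pi : List Nat) (t : Nat) : List Nat :=
  if t = 0 then pi ++ [0]
  else
    pi ++ [let k := kmpShift pi s t t (pi.getD (t - 1) 0)
           if s.getD t ' ' = s.getD k ' ' then k + 1 else k]

-- the prefix-function array of s (pi[t] written once per t, exactly as in Source B)
def kmpPi (s : List Char) : List Nat :=
  (List.range s.length).foldl (kmpStep s) []

-- the `while k > cap and k > 0: k = pi[k-1]` loop; fuel only makes it total
def kmpCap (pi : List Nat) (cap : Int) : Nat → Nat → Nat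
  | 0, k => k
  | fuel + 1, k =>
      if cap < (k : Int) ∧ 0 < k then kmpCap pi cap fuel (pi.getD (k - 1) 0) else k

def kmpOverlap (l r : String) : Int :=
  let s := r.toList ++ '\x00' :: l.toList
  let pi := kmpPi s
  let cap := min (PySem.Str.len l) (PySem.Str.len r) - 1
  ((kmpCap pi cap s.length (pi.getD (s.length - 1) 0) : Nat) : Int)

def altPieces (strings : List String) (ks : List Int) (n idx : Int) : List (String × Bool) :=
  let s := PySem.List.pyGetD strings idx ""
  let lk := if idx > 0 then PySem.List.pyGetD ks (idx - 1) 0 else 0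
  let rk := if idx < n - 1 then PySem.List.pyGetD ks idx 0 else 0
  (if lk > 0 then [(PySem.Str.slice s none (some lk), true)] else []) ++
    [(PySem.Str.slice s (some lk) (some (PySem.Str.len s - rk)), false)]

def unoverlap_list_alt (strings : List String) : List (String × Bool) :=
  let n := PySem.List.len strings
  let ks := (PySem.List.pyRange 0 (n - 1) 1).map
    (fun i => kmpOverlap (PySem.List.pyGetD strings i "") (PySem.List.pyGetD strings (i + 1) ""))
  (PySem.List.pyRange 0 n 1).flatMap (altPieces strings ks n)


-- ===== PRECONDITION & SPEC =====
def Spec_unoverlap_list (strings : List String) (out : List (String × Bool)) : Prop := out = unoverlap_list_alt strings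
instance (strings : List String) (out : List (String × Bool)) : Decidable (Spec_unoverlap_list strings out) := by unfold Spec_unoverlap_list; infer_instance

-- ===== CLAIM (what is proved, stated in full; the proofs are below) =====
def Claim_equal_unoverlap_list : Prop := ∀ (strings : List String), Dom_unoverlap_list strings → Spec_unoverlap_list strings (unoverlap_list strings)

-- ===== LEMMAS AND PROOFS =====

-- `specOverlap l r` is the overlap length A's per-pair scan computes, written as a
-- descending search; the proof shows BOTH ports' per-pair values equal it.
def specOverlap (left right : String) : Int :=
  ((PySem.List.pyRange (min (PySem.Str.len left) (PySem.Str.len right) - 1) 0 (-1)).find?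
      (fun j => PySem.Str.endswith left (PySem.Str.slice right none (some j)))).getD 0

-- k-border test: the length-k prefix of w equals its length-k suffix
def brdB (w : List Char) (k : Nat) : Bool := w.take k == w.drop (w.length - k)

-- longest proper border length of w
def maxB (w : List Char) : Nat := Nat.findGreatest (fun k => brdB w k = true) (w.length - 1)

theorem brdB_zero (w : List Char) : brdB w 0 = true := by
  simp [brdB]

theorem maxB_lt (w : List Char) (h : w ≠ []) : maxB w < w.length := by
  have h1 : maxB w ≤ w.length - 1 := Nat.findGreatest_le _
  have h2 : 0 < w.length := List.length_pos_iff.mpr h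
  omega

theorem maxB_brd (w : List Char) : brdB w (maxB w) = true := by
  unfold maxB
  exact Nat.findGreatest_spec (P := fun k => brdB w k = true) (Nat.zero_le _) (brdB_zero w)

theorem le_maxB (w : List Char) (k : Nat) (hb : brdB w k = true) (hk : k < w.length) :
    k ≤ maxB w :=
  Nat.le_findGreatest (by omega) hb

theorem brd_sub (w : List Char) (b k : Nat) (hb : brdB w b = true) (hbw : b ≤ w.length)
    (hk : k ≤ b) : brdB (w.take b) k = brdB w k := by
  have hb' : w.take b = w.drop (w.length - b) := by simpa [brdB] using hb
  have hlen : (w.take b).length = b := by simp [hbw]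
  unfold brdB
  rw [hlen, List.take_take, min_eq_left hk]
  conv_lhs => rw [hb', List.drop_drop]
  have harith : w.length - b + (b - k) = w.length - k := by omega
  rw [harith]

theorem brd_ext (s : List Char) (t k : Nat) (ht : t < s.length) (hk : k < t) :
    brdB (s.take (t + 1)) (k + 1) = (brdB (s.take t) k && (s.getD k ' ' == s.getD t ' ')) := by
  have hks : k < s.length := lt_trans hk ht
  have hlen1 : (s.take (t + 1)).length = t + 1 := by simp; omega
  have hlen0 : (s.take t).length = t := by simp; omega
  rw [Bool.eq_iff_iff]
  simp only [brdB, Bool.and_eq_true, beq_iff_eq, hlen1, hlen0]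
  have e1 : (s.take (t + 1)).take (k + 1) = s.take k ++ [s[k]] := by
    rw [List.take_take, min_eq_left (by omega), List.take_add_one,
      List.getElem?_eq_getElem hks]
    rfl
  have e2 : (s.take (t + 1)).drop (t + 1 - (k + 1)) = (s.drop (t - k)).take k ++ [s[t]] := by
    have h1 : t + 1 - (k + 1) = t - k := by omega
    rw [h1, List.drop_take, show t + 1 - (t - k) = k + 1 by omega, List.take_add_one,
      List.getElem?_drop, show t - k + k = t by omega, List.getElem?_eq_getElem ht]
    rfl
  have e3 : (s.take t).take k = s.take k := by
    rw [List.take_take, min_eq_left (by omega)]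
  have e4 : (s.take t).drop (t - k) = (s.drop (t - k)).take k := by
    rw [List.drop_take, show t - (t - k) = k by omega]
  rw [e1, e2, e3, e4]
  have hl1 : (s.take k).length = k := by simp; omega
  have hl2 : ((s.drop (t - k)).take k).length = k := by
    simp
    omega
  constructor
  · intro h
    obtain ⟨h1, h2⟩ := List.append_inj h (by rw [hl1, hl2])
    exact ⟨h1, by
      have := List.getD_eq_getElem s ' ' hks
      have := List.getD_eq_getElem s ' ' ht
      simp_all⟩
  · rintro ⟨h1, h2⟩
    rw [h1]
    rw [List.getD_eq_getElem s ' ' hks, List.getD_eq_getElem s ' ' ht] at h2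
    rw [h2]

theorem findGreatest_gap (p : Nat → Bool) (a b : Nat) (hba : b ≤ a)
    (hgap : ∀ k, b < k → k ≤ a → p k = false) :
    Nat.findGreatest (fun k => p k = true) a = Nat.findGreatest (fun k => p k = true) b := by
  induction a with
  | zero =>
      have hb0 : b = 0 := by omega
      rw [hb0]
  | succ m ih =>
      rcases Nat.lt_or_ge b (m + 1) with h | h
      · rw [Nat.findGreatest_succ, if_neg (by simp [hgap (m + 1) h (le_refl _)])]
        exact ih (by omega) (fun k h1 h2 => hgap k h1 (by omega))
      · have : b = m + 1 := by omega
        rw [this]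

theorem shift_spec (pi : List Nat) (s : List Char) (t : Nat)
    (hpi : ∀ i, i < t → pi.getD i 0 = maxB (s.take (i + 1)))
    (ht : t < s.length) :
    ∀ k0, brdB (s.take t) k0 = true → k0 < t →
      (∀ k, k < t → brdB (s.take t) k = true → s.getD k ' ' = s.getD t ' ' → k ≤ k0) →
      ∀ fuel, k0 < fuel →
      (if s.getD t ' ' = s.getD (kmpShift pi s t fuel k0) ' '
       then kmpShift pi s t fuel k0 + 1 else kmpShift pi s t fuel k0)
        = maxB (s.take (t + 1)) := by
  intro k0
  induction k0 using Nat.strong_induction_on with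
  | _ k0 ih =>
    intro hb hk0 hmax fuel hfuel
    cases fuel with
    | zero => omega
    | succ f =>
      have hlt : (s.take t).length = t := by rw [List.length_take]; omega
      have hlk0 : (s.take k0).length = k0 := by rw [List.length_take]; omega
      by_cases hc : 0 < k0 ∧ ¬ (s.getD t ' ' = s.getD k0 ' ')
      · have hstep : kmpShift pi s t (f + 1) k0 = kmpShift pi s t f (pi.getD (k0 - 1) 0) := by
          rw [kmpShift, if_pos hc]
        have hpik : pi.getD (k0 - 1) 0 = maxB (s.take k0) := by
          have h := hpi (k0 - 1) (by omega)
          rwa [show k0 - 1 + 1 = k0 by omega] at h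
        have hwk0 : (s.take t).take k0 = s.take k0 := by
          rw [List.take_take, min_eq_left (le_of_lt hk0)]
        have hk1lt : maxB (s.take k0) < k0 := by
          have h := maxB_lt (s.take k0) (by
            intro hnil
            rw [hnil] at hlk0
            simp at hlk0
            omega)
          rwa [hlk0] at h
        have hsub : ∀ k, k ≤ k0 → brdB (s.take k0) k = brdB (s.take t) k := by
          intro k hkk
          have h := brd_sub (s.take t) k0 k hb (by omega) hkk
          rwa [hwk0] at h
        have hb1 : brdB (s.take t) (maxB (s.take k0)) = true := by
          rw [← hsub _ (le_of_lt hk1lt)]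
          exact maxB_brd _
        have hmax1 : ∀ k, k < t → brdB (s.take t) k = true → s.getD k ' ' = s.getD t ' ' →
            k ≤ maxB (s.take k0) := by
          intro k hkt hbk hch
          have h1 := hmax k hkt hbk hch
          have hkne : k ≠ k0 := by
            intro he
            exact hc.2 (he ▸ hch).symm
          have h2 : brdB (s.take k0) k = true := by
            rw [hsub _ (by omega)]
            exact hbk
          have := le_maxB (s.take k0) k h2 (by omega)
          omega
        rw [hstep, hpik]
        exact ih (maxB (s.take k0)) hk1lt hb1 (by omega) hmax1 f (by omega)
      · have hstep : kmpShift pi s t (f + 1) k0 = k0 := by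
          rw [kmpShift, if_neg hc]
        rw [hstep]
        have hmgen : ∀ m, brdB (s.take (t + 1)) m = true → m < t + 1 → 0 < m →
            brdB (s.take t) (m - 1) = true ∧ s.getD (m - 1) ' ' = s.getD t ' ' ∧ m - 1 < t := by
          intro m hm hmlt hmpos
          rw [show m = (m - 1) + 1 by omega, brd_ext s t (m - 1) ht (by omega)] at hm
          obtain ⟨h1, h2⟩ := Bool.and_eq_true_iff.mp hm
          exact ⟨h1, beq_iff_eq.mp h2, by omega⟩
        by_cases hch : s.getD t ' ' = s.getD k0 ' '
        · rw [if_pos hch]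
          have hup : brdB (s.take (t + 1)) (k0 + 1) = true := by
            rw [brd_ext s t k0 ht hk0, hb, Bool.true_and, beq_iff_eq]
            exact hch.symm
          have hge : k0 + 1 ≤ maxB (s.take (t + 1)) := by
            apply le_maxB _ _ hup
            rw [List.length_take]
            omega
          have hle : maxB (s.take (t + 1)) ≤ k0 + 1 := by
            by_contra hgt
            have hlen2 : (s.take (t + 1)).length = t + 1 := by rw [List.length_take]; omega
            have hmlt : maxB (s.take (t + 1)) < t + 1 := by
              have h := maxB_lt (s.take (t + 1)) (by
                intro hnil
                rw [hnil] at hlen2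
                simp at hlen2)
              rwa [hlen2] at h
            obtain ⟨h1, h2, h3⟩ := hmgen (maxB (s.take (t + 1))) (maxB_brd _) hmlt (by omega)
            have := hmax _ h3 h1 h2
            omega
          omega
        · rw [if_neg hch]
          have hk00 : k0 = 0 := by
            rcases not_and_or.mp hc with h | h
            · omega
            · exact absurd (not_not.mp h) hch
          subst hk00
          by_contra hne
          have hpos : 0 < maxB (s.take (t + 1)) := by omega
          have hlen2 : (s.take (t + 1)).length = t + 1 := by rw [List.length_take]; omega
          have hmlt : maxB (s.take (t + 1)) < t + 1 := by
            have h := maxB_lt (s.take (t + 1)) (by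
              intro hnil
              rw [hnil] at hlen2
              simp at hlen2)
            rwa [hlen2] at h
          obtain ⟨h1, h2, h3⟩ := hmgen (maxB (s.take (t + 1))) (maxB_brd _) hmlt hpos
          have hle0 := hmax _ h3 h1 h2
          have : maxB (s.take (t + 1)) - 1 = 0 := by omega
          rw [this] at h2
          exact hch h2.symm

theorem kmpPi_aux (s : List Char) : ∀ n, n ≤ s.length →
    ((List.range n).foldl (kmpStep s) []).length = n ∧
      (∀ i, i < n → ((List.range n).foldl (kmpStep s) []).getD i 0 = maxB (s.take (i + 1))) := by
  intro n
  induction n with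
  | zero => simp
  | succ m ih =>
    intro hn
    obtain ⟨ihl, ihg⟩ := ih (by omega)
    rw [List.range_succ, List.foldl_append, List.foldl_cons, List.foldl_nil]
    by_cases hm : m = 0
    · subst hm
      have hF0 : (List.range 0).foldl (kmpStep s) [] = ([] : List Nat) := rfl
      rw [hF0]
      refine ⟨by simp [kmpStep], ?_⟩
      intro i hi
      have hi0 : i = 0 := by omega
      subst hi0
      have hmax1 : maxB (s.take 1) = 0 := by
        unfold maxB
        rw [show (s.take 1).length - 1 = 0 by rw [List.length_take]; omega,
          Nat.findGreatest_zero]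
      simp [kmpStep, hmax1]
    · have hk0eq : ((List.range m).foldl (kmpStep s) []).getD (m - 1) 0 = maxB (s.take m) := by
        have h := ihg (m - 1) (by omega)
        rwa [show m - 1 + 1 = m by omega] at h
      have hwlen : (s.take m).length = m := by rw [List.length_take]; omega
      have hk0lt : maxB (s.take m) < m := by
        have h := maxB_lt (s.take m) (by
          intro hnil
          rw [hnil] at hwlen
          simp at hwlen
          omega)
        rwa [hwlen] at h
      have hshift := shift_spec ((List.range m).foldl (kmpStep s) []) s m
        (fun i hi => ihg i hi) (by omega) (maxB (s.take m)) (maxB_brd _) hk0lt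
        (fun k hkm hbk _ => le_maxB (s.take m) k hbk (by omega)) m hk0lt
      rw [← hk0eq] at hshift
      have hstepEq : kmpStep s ((List.range m).foldl (kmpStep s) []) m
          = ((List.range m).foldl (kmpStep s) []) ++ [maxB (s.take (m + 1))] := by
        rw [← hshift, kmpStep, if_neg hm]
      rw [hstepEq]
      refine ⟨by simp [ihl], ?_⟩
      intro i hi
      rcases Nat.lt_or_ge i m with h | h
      · rw [List.getD_append _ _ _ _ (by omega), ihg i h]
      · have hieq : i = m := by omega
        subst hieq
        rw [List.getD_append_right _ _ _ _ (by omega), ihl, Nat.sub_self]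
        rfl

theorem pi_correct (s : List Char) :
    (kmpPi s).length = s.length ∧
      ∀ i, i < s.length → (kmpPi s).getD i 0 = maxB (s.take (i + 1)) := by
  unfold kmpPi
  exact kmpPi_aux s s.length (le_refl _)

theorem cap_spec (pi : List Nat) (s : List Char) (cap : Int)
    (hpi : ∀ i, i < s.length → pi.getD i 0 = maxB (s.take (i + 1))) :
    ∀ k0, brdB s k0 = true → k0 < s.length →
      ∀ fuel, k0 < fuel →
      kmpCap pi cap fuel k0
        = Nat.findGreatest (fun k => (brdB s k && decide ((k : Int) ≤ cap)) = true) k0 := by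
  intro k0
  induction k0 using Nat.strong_induction_on with
  | _ k0 ih =>
    intro hb hk0 fuel hfuel
    cases fuel with
    | zero => omega
    | succ f =>
      have hlk0 : (s.take k0).length = k0 := by rw [List.length_take]; omega
      by_cases hc : cap < (k0 : Int) ∧ 0 < k0
      · rw [kmpCap, if_pos hc]
        have hpik : pi.getD (k0 - 1) 0 = maxB (s.take k0) := by
          have h := hpi (k0 - 1) (by omega)
          rwa [show k0 - 1 + 1 = k0 by omega] at h
        have hk1lt : maxB (s.take k0) < k0 := by
          have h := maxB_lt (s.take k0) (by
            intro hnil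
            rw [hnil] at hlk0
            simp at hlk0
            omega)
          rwa [hlk0] at h
        have hsub : ∀ k, k ≤ k0 → brdB (s.take k0) k = brdB s k := by
          intro k hkk
          exact brd_sub s k0 k hb (by omega) hkk
        have hb1 : brdB s (maxB (s.take k0)) = true := by
          rw [← hsub _ (le_of_lt hk1lt)]
          exact maxB_brd _
        rw [hpik, ih (maxB (s.take k0)) hk1lt hb1 (by omega) f (by omega)]
        refine (findGreatest_gap _ k0 (maxB (s.take k0)) (le_of_lt hk1lt) ?_).symm
        intro k hgt hle
        by_cases hkk : k = k0
        · subst hkk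
          simp [decide_eq_false (not_le.mpr hc.1)]
        · cases hbk : brdB s k with
          | false => simp
          | true =>
              exfalso
              have h2 : brdB (s.take k0) k = true := by
                rw [hsub _ (by omega)]
                exact hbk
              have := le_maxB (s.take k0) k h2 (by omega)
              omega
      · rw [kmpCap, if_neg hc]
        rcases not_and_or.mp hc with h | h
        · have hle : (k0 : Int) ≤ cap := by omega
          symm
          exact Nat.le_antisymm (Nat.findGreatest_le _)
            (Nat.le_findGreatest (le_refl _) (by simp [hb, hle]))
        · have hk00 : k0 = 0 := by omega
          rw [hk00, Nat.findGreatest_zero]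

-- '\x00' occurs in R ++ '\x00' :: L only at position R.length (L, R sep-free)
theorem sep_unique (L R : List Char) (hL : '\x00' ∉ L) (hR : '\x00' ∉ R) :
    ∀ j, (R ++ '\x00' :: L).getD j ' ' = '\x00' → j = R.length := by
  intro j hj
  by_contra hne
  rcases Nat.lt_or_ge j R.length with h | h
  · rw [List.getD_append _ _ _ _ h, List.getD_eq_getElem _ _ h] at hj
    exact hR (hj ▸ List.getElem_mem h)
  · have h' : R.length < j := by omega
    rcases Nat.lt_or_ge j (R ++ '\x00' :: L).length with h2 | h2
    · rw [List.length_append, List.length_cons] at h2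
      have hj2 : j - R.length - 1 < L.length := by omega
      have hd : j - R.length = (j - R.length - 1) + 1 := by omega
      have : (R ++ '\x00' :: L).getD j ' ' = L.getD (j - R.length - 1) ' ' := by
        rw [List.getD_eq_getElem?_getD, List.getD_eq_getElem?_getD,
          List.getElem?_append_right (by omega), hd, List.getElem?_cons_succ]
        simp
      rw [this, List.getD_eq_getElem _ _ hj2] at hj
      exact hL (hj ▸ List.getElem_mem hj2)
    · rw [List.getD_eq_default _ _ (by omega)] at hj
      exact absurd hj (by decide)

theorem brd_overlap_iff (L R : List Char) (hL : '\x00' ∉ L) (hR : '\x00' ∉ R) (k : Nat)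
    (hk : k < (R ++ '\x00' :: L).length) :
    brdB (R ++ '\x00' :: L) k = true ↔
      (k ≤ min L.length R.length ∧ R.take k = L.drop (L.length - k)) := by
  set s := R ++ '\x00' :: L with hs
  have hlen : s.length = R.length + (L.length + 1) := by simp [hs]
  have eTake : ∀ k', k' ≤ R.length → s.take k' = R.take k' := by
    intro k' hk'
    rw [hs, List.take_append_of_le_length hk']
  have eDrop : ∀ k', k' ≤ L.length → s.drop (s.length - k') = L.drop (L.length - k') := by
    intro k' hk'
    rw [hs, List.drop_append, List.drop_eq_nil_of_le (by rw [← hs, hlen]; omega),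
      List.nil_append, show s.length - k' - R.length = (L.length - k') + 1 by rw [hlen]; omega,
      List.drop_succ_cons]
  have hsep : s[R.length]? = some '\x00' := by
    rw [hs, List.getElem?_append_right (le_refl _), Nat.sub_self, List.getElem?_cons_zero]
  constructor
  · intro hb
    have hb' : s.take k = s.drop (s.length - k) := by simpa [brdB] using hb
    have hkR : k ≤ R.length := by
      by_contra hgt
      have h1 := congrArg (fun (l : List Char) => l[R.length]?) hb'
      simp only [List.getElem?_take, List.getElem?_drop] at h1
      rw [if_pos (by omega), hsep] at h1
      have h3 : s.getD (s.length - k + R.length) ' ' = '\x00' := by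
        rw [List.getD_eq_getElem?_getD, ← h1]
        rfl
      have h4 := sep_unique L R hL hR _ h3
      rw [hlen] at h4 hk
      omega
    have hkL : k ≤ L.length := by
      by_contra hgt
      have h1 := congrArg (fun (l : List Char) => l[k - L.length - 1]?) hb'
      simp only [List.getElem?_take, List.getElem?_drop] at h1
      rw [if_pos (by omega), show s.length - k + (k - L.length - 1) = R.length by
        rw [hlen]; omega, hsep] at h1
      have hidx : k - L.length - 1 < R.length := by omega
      rw [hs, List.getElem?_append_left hidx, List.getElem?_eq_getElem hidx] at h1
      exact hR ((Option.some.inj h1) ▸ List.getElem_mem hidx)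
    refine ⟨by omega, ?_⟩
    rw [eTake k hkR, eDrop k hkL] at hb'
    exact hb'
  · rintro ⟨hmin, heq⟩
    have hb' : s.take k = s.drop (s.length - k) := by
      rw [eTake k (by omega), eDrop k (by omega)]
      exact heq
    simpa [brdB] using hb'

theorem findD_eq_findGreatest (p : Int → Bool) (n : Nat) :
    (((PySem.List.pyRange (n : Int) 0 (-1)).find? p).getD 0)
      = ((Nat.findGreatest (fun k => p (k : Int) = true) n : Nat) : Int) := by
  induction n with
  | zero =>
      rw [PySem.List.pyRange_neg_one_eq_nil (by omega)]
      simp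
  | succ m ih =>
      have h1 : ((m + 1 : Nat) : Int) = (m : Int) + 1 := by push_cast; ring
      rw [h1, PySem.List.pyRange_neg_one_cons (by omega), List.find?_cons]
      have h2 : ((m : Int) + 1 - 1) = (m : Int) := by ring
      rw [h2, Nat.findGreatest_succ]
      cases hp : p ((m : Int) + 1) with
      | true =>
          have hp' : p ((m + 1 : Nat) : Int) = true := by rw [h1]; exact hp
          rw [if_pos hp']
          push_cast
          rfl
      | false =>
          have hp' : ¬ p ((m + 1 : Nat) : Int) = true := by rw [h1]; simp [hp]
          rw [if_neg hp']
          exact ih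

theorem endswith_take (l r : String) (k : Nat) (_hkl : k ≤ l.toList.length)
    (hkr : k ≤ r.toList.length) :
    PySem.Str.endswith l (PySem.Str.slice r none (some (k : Int)))
      = (r.toList.take k == l.toList.drop (l.toList.length - k)) := by
  have hsr : (PySem.Str.slice r none (some (k : Int))).toList = r.toList.take k := by
    rw [PySem.Str.toList_slice, PySem.Chars.slice_eq_listSlice, PySem.List.slice_to_natCast]
  rw [Bool.eq_iff_iff, PySem.Str.endswith_eq, hsr, PySem.Chars.endswith_iff, beq_iff_eq,
    List.suffix_iff_eq_drop, List.length_take, min_eq_left hkr]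

theorem findGreatest_pos_spec (p : Nat → Bool) (n : Nat)
    (h : 0 < Nat.findGreatest (fun k => p k = true) n) :
    p (Nat.findGreatest (fun k => p k = true) n) = true := by
  by_contra hP
  have : Nat.findGreatest (fun k => p k = true) n = 0 := by
    rw [Nat.findGreatest_eq_zero_iff]
    intro k _ hk2 hpk
    exact hP (Nat.findGreatest_spec (P := fun k => p k = true) hk2 hpk)
  omega

theorem kmp_eq_spec (l r : String) (hl : '\x00' ∉ l.toList) (hr : '\x00' ∉ r.toList) :
    kmpOverlap l r = specOverlap l r := by
  have hslen : (r.toList ++ '\x00' :: l.toList).length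
      = r.toList.length + (l.toList.length + 1) := by simp
  obtain ⟨hpl, hpg⟩ := pi_correct (r.toList ++ '\x00' :: l.toList)
  set s := r.toList ++ '\x00' :: l.toList with hs
  set m : Nat := min l.toList.length r.toList.length with hmdef
  have hcap : min (PySem.Str.len l) (PySem.Str.len r) - 1 = (m : Int) - 1 := by
    simp [hmdef]
  have hk0 : (kmpPi s).getD (s.length - 1) 0 = maxB s := by
    have h := hpg (s.length - 1) (by omega)
    rwa [show s.length - 1 + 1 = s.length by omega, List.take_length] at h
  have hsne : s ≠ [] := by
    intro hnil
    rw [hnil] at hslen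
    simp at hslen
  have hmaxlt : maxB s < s.length := maxB_lt s hsne
  have hcapspec := cap_spec (kmpPi s) s ((m : Int) - 1) hpg (maxB s) (maxB_brd s) hmaxlt
    s.length hmaxlt
  have hlhs : kmpOverlap l r
      = ((Nat.findGreatest
          (fun k => (brdB s k && decide ((k : Int) ≤ (m : Int) - 1)) = true) (maxB s) : Nat) : Int) := by
    rw [kmpOverlap]
    rw [← hs, hcap, hk0, hcapspec]
  rw [hlhs]
  unfold specOverlap
  rw [hcap]
  rcases Nat.eq_zero_or_pos m with hm0 | hmpos
  · rw [hm0]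
    rw [show ((0 : Nat) : Int) - 1 = -1 by decide, PySem.List.pyRange_neg_one_eq_nil (by omega)]
    rw [findGreatest_gap _ (maxB s) 0 (Nat.zero_le _) (fun k hk1 _ => by
      have hdec : decide ((k : Int) ≤ -1) = false := by
        simp
        omega
      rw [hdec, Bool.and_false])]
    simp
  · have hb1 : ((m : Int) - 1) = ((m - 1 : Nat) : Int) := by push_cast [hmpos]; ring
    conv_rhs => rw [hb1]
    rw [findD_eq_findGreatest (fun j => PySem.Str.endswith l (PySem.Str.slice r none (some j))) (m - 1)]
    -- pointwise agreement of the two predicates on k ≤ m - 1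
    have hpt : ∀ k, k ≤ m - 1 →
        ((brdB s k && decide ((k : Int) ≤ (m : Int) - 1)) = true
          ↔ PySem.Str.endswith l (PySem.Str.slice r none (some (k : Int))) = true) := by
      intro k hk
      have hkm : k ≤ m := by omega
      have hks : k < s.length := by rw [hslen]; omega
      have hdec : decide ((k : Int) ≤ (m : Int) - 1) = true := by
        simp
        omega
      rw [hdec, Bool.and_true]
      rw [endswith_take l r k (by omega) (by omega), beq_iff_eq]
      rw [brd_overlap_iff l.toList r.toList hl hr k hks]
      constructor
      · exact fun h => h.2
      · exact fun h => ⟨by omega, h⟩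
    have hnat : Nat.findGreatest
          (fun k => (brdB s k && decide ((k : Int) ≤ (m : Int) - 1)) = true) (maxB s)
        = Nat.findGreatest
          (fun k => PySem.Str.endswith l (PySem.Str.slice r none (some (k : Int))) = true) (m - 1) := by
      set X := Nat.findGreatest
          (fun k => (brdB s k && decide ((k : Int) ≤ (m : Int) - 1)) = true) (maxB s) with hX
      set Y := Nat.findGreatest
          (fun k => PySem.Str.endswith l (PySem.Str.slice r none (some (k : Int))) = true) (m - 1) with hY
      apply Nat.le_antisymm
      · rcases Nat.eq_zero_or_pos X with h0 | hpos
        · rw [h0]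
          exact Nat.zero_le _
        · have hP : (brdB s X && decide ((X : Int) ≤ (m : Int) - 1)) = true := by
            rw [hX]
            exact findGreatest_pos_spec
              (fun k => brdB s k && decide ((k : Int) ≤ (m : Int) - 1)) _ (hX ▸ hpos)
          have hXle : X ≤ m - 1 := by
            have := of_decide_eq_true (Bool.and_eq_true_iff.mp hP).2
            omega
          rw [hY]
          exact Nat.le_findGreatest hXle ((hpt X hXle).mp hP)
      · rcases Nat.eq_zero_or_pos Y with h0 | hpos
        · rw [h0]
          exact Nat.zero_le _
        · have hP : PySem.Str.endswith l (PySem.Str.slice r none (some (Y : Int))) = true := by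
            rw [hY]
            exact findGreatest_pos_spec
              (fun k => PySem.Str.endswith l (PySem.Str.slice r none (some (k : Int)))) _ (hY ▸ hpos)
          have hYle : Y ≤ m - 1 := by
            rw [hY]
            exact Nat.findGreatest_le _
          have hP1 := (hpt Y hYle).mpr hP
          have hbY : brdB s Y = true := (Bool.and_eq_true_iff.mp hP1).1
          have hYmax : Y ≤ maxB s := le_maxB s Y hbY (by rw [hslen]; omega)
          rw [hX]
          exact Nat.le_findGreatest hYmax hP1
    rw [hnat]

-- ===== A-side reduction (as in the per-pair scan of A) =====

theorem scan_eq {β : Type} (m : Nat) (P : Int → Bool) (hP0 : P 0 = false) (g : Int → β) (d : β) :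
    (PySem.List.pyRange 0 (m : Int) 1).foldl (fun st i => if P i then (i, g i) else st) ((0 : Int), d)
      = match (PySem.List.pyRange ((m : Int) - 1) 0 (-1)).find? P with
        | some j => (j, g j)
        | none => ((0 : Int), d) := by
  induction m with
  | zero =>
      rw [PySem.List.pyRange_one_eq_nil (by omega), PySem.List.pyRange_neg_one_eq_nil (by omega)]
      simp
  | succ k ih =>
      have h1 : ((k + 1 : Nat) : Int) = (k : Int) + 1 := by push_cast; ring
      rw [h1, PySem.List.pyRange_one_succ_right (by positivity), List.foldl_append]
      have h2 : ((k : Int) + 1 - 1) = (k : Int) := by ring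
      rw [h2]
      rcases Nat.eq_zero_or_pos k with hk | hk
      · subst hk
        rw [PySem.List.pyRange_one_eq_nil (by omega), PySem.List.pyRange_neg_one_eq_nil (by omega)]
        simp [hP0]
      · rw [PySem.List.pyRange_neg_one_cons (by exact_mod_cast hk), List.find?_cons]
        cases hPk : P (k : Int) with
        | true => simp [hPk]
        | false => simpa [hPk] using ih


theorem pred_agree (l r : String) (j : Int)
    (h1 : 0 < j) (h2 : j < min (PySem.Str.len l) (PySem.Str.len r)) :
    ((PySem.Str.slice l (some (-j)) none == PySem.Str.slice r none (some j)))
      = PySem.Str.endswith l (PySem.Str.slice r none (some j)) := by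
  obtain ⟨jn, rfl⟩ : ∃ jn : Nat, j = (jn : Int) := ⟨j.toNat, by omega⟩
  have hl : jn < l.toList.length := by simp at h2 ⊢; omega
  have hr : jn < r.toList.length := by simp at h2 ⊢; omega
  have h0 : 0 < jn := by exact_mod_cast h1
  have hsl : (PySem.Str.slice l (some (-(jn:Int))) none).toList = l.toList.drop (l.toList.length - jn) := by
    rw [PySem.Str.toList_slice, PySem.Chars.slice_eq_listSlice, PySem.List.slice_from_neg_natCast _ _ h0]
  have hsr : (PySem.Str.slice r none (some (jn:Int))).toList = r.toList.take jn := by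
    rw [PySem.Str.toList_slice, PySem.Chars.slice_eq_listSlice, PySem.List.slice_to_natCast]
  rw [Bool.eq_iff_iff, beq_iff_eq,
    show (PySem.Str.slice l (some (-(jn:Int))) none = PySem.Str.slice r none (some (jn:Int)))
        ↔ ((PySem.Str.slice l (some (-(jn:Int))) none).toList = (PySem.Str.slice r none (some (jn:Int))).toList)
      from ⟨congrArg _, fun h => String.ext h⟩,
    hsl, hsr, PySem.Str.endswith_eq, PySem.Chars.endswith_iff, hsr]
  constructor
  · intro h; rw [← h]; exact List.drop_suffix _ _
  · intro h
    have := List.suffix_iff_eq_drop.mp h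
    rw [List.length_take, min_eq_left (le_of_lt hr)] at this
    exact this.symm


theorem find?_congr_mem {α : Type} {p q : α → Bool} : ∀ (xs : List α), (∀ x ∈ xs, p x = q x) → xs.find? p = xs.find? q := by
  intro xs h
  induction xs with
  | nil => rfl
  | cons x t ih =>
      rw [List.find?_cons, List.find?_cons, h x (by simp)]
      cases q x
      · exact ih (fun y hy => h y (by simp [hy]))
      · rfl


theorem slice_zero_str (r : String) : PySem.Str.slice r none (some 0) = "" := by
  apply String.ext
  rw [PySem.Str.toList_slice, PySem.Chars.slice_eq_listSlice]
  simpa using PySem.List.slice_to_natCast r.toList 0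


theorem overlap_eq (l r : String) :
    get_overlap_length l r = (specOverlap l r, PySem.Str.slice r none (some (specOverlap l r))) := by
  unfold get_overlap_length specOverlap
  have hm : min (PySem.Str.len l) (PySem.Str.len r) = ((min l.length r.length : Nat) : Int) := by
    simp
  rw [hm]
  set mn : Nat := min l.length r.length with hmn
  rcases Nat.eq_zero_or_pos mn with h0 | hpos
  · rw [h0]
    rw [PySem.List.pyRange_one_eq_nil (by omega), PySem.List.pyRange_neg_one_eq_nil (by omega)]
    simp [slice_zero_str r]
  · have hP0 : ((fun i => PySem.Str.slice l (some (-i)) none == PySem.Str.slice r none (some i)) (0:Int)) = false := by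
      simp only [neg_zero]
      rw [beq_eq_false_iff_ne]
      intro hcontra
      have hteq := congrArg String.toList hcontra
      rw [PySem.Str.toList_slice, PySem.Str.toList_slice, PySem.Chars.slice_eq_listSlice,
        PySem.Chars.slice_eq_listSlice, PySem.List.slice_zero_start, PySem.List.slice_none_none] at hteq
      have h2 := congrArg List.length hteq
      rw [show PySem.List.slice r.toList none (some (0:Int)) = r.toList.take 0 from by
            simpa using PySem.List.slice_to_natCast r.toList 0] at h2
      simp at h2
      rw [hmn] at hpos
      rw [h2] at hpos
      simp at hpos
    rw [scan_eq mn _ hP0 (fun i => PySem.Str.slice l (some (-i)) none) ""]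
    rw [find?_congr_mem (q := fun j => PySem.Str.endswith l (PySem.Str.slice r none (some j))) _
      (fun j hj => by
        rw [PySem.List.mem_pyRange_neg_one] at hj
        exact pred_agree l r j hj.1 (by rw [hm]; omega))]
    cases hfind : (PySem.List.pyRange ((mn : Int) - 1) 0 (-1)).find?
        (fun j => PySem.Str.endswith l (PySem.Str.slice r none (some j))) with
    | none => simp [slice_zero_str r]
    | some j =>
        simp only [Option.getD_some]
        have hmem := List.mem_of_find?_eq_some hfind
        rw [PySem.List.mem_pyRange_neg_one] at hmem
        have hQ := List.find?_some hfind
        have hP : (PySem.Str.slice l (some (-j)) none == PySem.Str.slice r none (some j)) = true := by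
          rw [pred_agree l r j hmem.1 (by rw [hm]; omega)]; exact hQ
        rw [beq_iff_eq] at hP
        rw [hP]


theorem specOverlap_bounds (l r : String) :
    0 ≤ specOverlap l r ∧ (0 < specOverlap l r → specOverlap l r < min (PySem.Str.len l) (PySem.Str.len r)) := by
  unfold specOverlap
  cases hfind : (PySem.List.pyRange (min (PySem.Str.len l) (PySem.Str.len r) - 1) 0 (-1)).find?
      (fun j => PySem.Str.endswith l (PySem.Str.slice r none (some j))) with
  | none => simp
  | some j =>
      have hmem := List.mem_of_find?_eq_some hfind
      rw [PySem.List.mem_pyRange_neg_one] at hmem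
      simp only [Option.getD_some]
      omega


theorem foldl_cond_append {α β : Type} (c : α → Prop) [DecidablePred c] (x y : α → β) :
    ∀ (l : List α) (acc : List β),
      l.foldl (fun acc a => (if c a then acc ++ [x a] else acc) ++ [y a]) acc
        = acc ++ l.flatMap (fun a => (if c a then [x a] else []) ++ [y a]) := by
  intro l
  induction l with
  | nil => simp
  | cons a t ih =>
      intro acc
      rw [List.foldl_cons, ih, List.flatMap_cons]
      split_ifs <;> simp


theorem len_slice_to (s : String) (k : Int) (hk : 0 ≤ k) :
    PySem.Str.len (PySem.Str.slice s none (some k)) = min k (PySem.Str.len s) := by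
  have ht : (PySem.Str.slice s none (some k)).toList = s.toList.take k.toNat := by
    rw [PySem.Str.toList_slice, PySem.Chars.slice_eq_listSlice, PySem.List.slice_to _ hk]
  have h2 := congrArg List.length ht
  simp at h2 ⊢
  omega


theorem overlaps_eq (strings : List String) :
    get_overlap_list strings
      = (PySem.List.pyRange 0 (PySem.List.len strings - 1) 1).map
          (fun i => get_overlap_length (PySem.List.pyGetD strings i "") (PySem.List.pyGetD strings (i + 1) "")) := by
  unfold get_overlap_list
  rw [PySem.List.foldl_append_singleton_eq_map]
  simp


theorem dom_no_sep (s : String) (h : pvDomStr s = true) : '\x00' ∉ s.toList := by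
  intro hmem
  have := (List.all_eq_true.mp h) _ hmem
  simp [pvDomChar] at this

theorem main_eq (strings : List String) (hdom : Dom_unoverlap_list strings) :
    unoverlap_list strings = unoverlap_list_alt strings := by
  have hall : ∀ x ∈ strings, pvDomStr x = true := List.all_eq_true.mp hdom
  have hmemget : ∀ i : Int, 0 ≤ i → i < (strings.length : Int) →
      PySem.List.pyGetD strings i "" ∈ strings := by
    intro i h0 h1
    obtain ⟨iN, rfl⟩ : ∃ iN : Nat, i = (iN : Int) := ⟨i.toNat, by omega⟩
    have hiN : iN < strings.length := by exact_mod_cast h1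
    rw [PySem.List.pyGetD_natCast, List.getD_eq_getElem _ _ hiN]
    exact List.getElem_mem hiN
  unfold unoverlap_list unoverlap_list_alt
  rw [PySem.List.enumerate_eq_map_pyRange strings "", List.foldl_map]
  rw [foldl_cond_append
    (c := fun j => j > 0 ∧ PySem.Str.len ((PySem.List.pyGetD (get_overlap_list strings) (j - 1) (0, "")).2) > 0)
    (x := fun j => ((PySem.List.pyGetD (get_overlap_list strings) (j - 1) (0, "")).2, true))
    (y := fun j => (PySem.Str.slice (PySem.List.pyGetD strings j "")
        (some (if j > 0 then (PySem.List.pyGetD (get_overlap_list strings) (j - 1) (0, "")).1 else 0))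
        (some (PySem.Str.len (PySem.List.pyGetD strings j "")
          - (if j < PySem.List.len strings - 1 then (PySem.List.pyGetD (get_overlap_list strings) j (0, "")).1 else 0))), false))]
  rw [List.nil_append]
  apply List.flatMap_congr
  intro idx hidx
  rw [PySem.List.mem_pyRange_one] at hidx
  simp only [PySem.List.len_eq] at hidx
  dsimp only [altPieces]
  have hks : ∀ i : Int, 0 ≤ i → i < (strings.length : Int) - 1 →
      PySem.List.pyGetD
        (List.map (fun i => kmpOverlap (PySem.List.pyGetD strings i "") (PySem.List.pyGetD strings (i + 1) ""))
          (PySem.List.pyRange 0 ((strings.length : Int) - 1))) i 0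
      = specOverlap (PySem.List.pyGetD strings i "") (PySem.List.pyGetD strings (i + 1) "") := by
    intro i h0 h1
    rw [PySem.List.pyGetD_map_pyRange_of_nonneg _ _ _ _ h0 h1]
    exact kmp_eq_spec _ _
      (dom_no_sep _ (hall _ (hmemget i h0 (by omega))))
      (dom_no_sep _ (hall _ (hmemget (i + 1) (by omega) (by omega))))
  have hov : ∀ i : Int, 0 ≤ i → i < (strings.length : Int) - 1 →
      PySem.List.pyGetD (get_overlap_list strings) i ((0 : Int), "")
      = (specOverlap (PySem.List.pyGetD strings i "") (PySem.List.pyGetD strings (i + 1) ""),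
         PySem.Str.slice (PySem.List.pyGetD strings (i + 1) "") none
           (some (specOverlap (PySem.List.pyGetD strings i "") (PySem.List.pyGetD strings (i + 1) "")))) := by
    intro i h0 h1
    rw [overlaps_eq, show PySem.List.len strings - 1 = (strings.length : Int) - 1 by simp,
      PySem.List.pyGetD_map_pyRange_of_nonneg _ _ _ _ h0 h1, overlap_eq]
  simp only [PySem.List.len_eq]
  by_cases hr : idx < (strings.length : Int) - 1
  · rw [if_pos hr, if_pos hr, hov idx hidx.1 hr, hks idx hidx.1 hr]
    by_cases hpos : idx > 0
    · have h0m : (0:Int) ≤ idx - 1 := by omega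
      have h1m : idx - 1 < (strings.length : Int) - 1 := by omega
      have hov' := hov (idx - 1) h0m h1m
      have hks' := hks (idx - 1) h0m h1m
      rw [show idx - 1 + 1 = idx from by ring] at hov' hks'
      rw [hov', hks']
      dsimp only
      have hb := specOverlap_bounds (PySem.List.pyGetD strings (idx - 1) "") (PySem.List.pyGetD strings idx "")
      set k := specOverlap (PySem.List.pyGetD strings (idx - 1) "") (PySem.List.pyGetD strings idx "") with hkdef
      by_cases hk : 0 < k
      · have hklt := hb.2 hk
        have hcond : idx > 0 ∧ PySem.Str.len (PySem.Str.slice (PySem.List.pyGetD strings idx "") none (some k)) > 0 := by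
          refine ⟨hpos, ?_⟩
          rw [len_slice_to _ _ hb.1]
          omega
        rw [if_pos hcond, if_pos hpos, if_pos hk]
      · have hk0 : k = 0 := by omega
        have hcond : ¬ (idx > 0 ∧ PySem.Str.len (PySem.Str.slice (PySem.List.pyGetD strings idx "") none (some k)) > 0) := by
          rw [hk0, len_slice_to _ _ (by omega)]
          have hsnn : (0:Int) ≤ PySem.Str.len (PySem.List.pyGetD strings idx "") := by simp
          omega
        rw [if_pos hpos, if_neg hcond, if_neg (by omega : ¬ k > 0)]
    · rw [if_neg (fun h => hpos h.1), if_neg hpos, if_neg hpos, if_neg (by omega : ¬ (0:Int) > 0)]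
  · rw [if_neg hr, if_neg hr]
    by_cases hpos : idx > 0
    · have h0m : (0:Int) ≤ idx - 1 := by omega
      have h1m : idx - 1 < (strings.length : Int) - 1 := by omega
      have hov' := hov (idx - 1) h0m h1m
      have hks' := hks (idx - 1) h0m h1m
      rw [show idx - 1 + 1 = idx from by ring] at hov' hks'
      rw [hov', hks']
      dsimp only
      have hb := specOverlap_bounds (PySem.List.pyGetD strings (idx - 1) "") (PySem.List.pyGetD strings idx "")
      set k := specOverlap (PySem.List.pyGetD strings (idx - 1) "") (PySem.List.pyGetD strings idx "") with hkdef
      by_cases hk : 0 < k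
      · have hklt := hb.2 hk
        have hcond : idx > 0 ∧ PySem.Str.len (PySem.Str.slice (PySem.List.pyGetD strings idx "") none (some k)) > 0 := by
          refine ⟨hpos, ?_⟩
          rw [len_slice_to _ _ hb.1]
          omega
        rw [if_pos hcond, if_pos hpos, if_pos hk]
      · have hk0 : k = 0 := by omega
        have hcond : ¬ (idx > 0 ∧ PySem.Str.len (PySem.Str.slice (PySem.List.pyGetD strings idx "") none (some k)) > 0) := by
          rw [hk0, len_slice_to _ _ (by omega)]
          have hsnn : (0:Int) ≤ PySem.Str.len (PySem.List.pyGetD strings idx "") := by simp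
          omega
        rw [if_pos hpos, if_neg hcond, if_neg (by omega : ¬ k > 0)]
    · rw [if_neg (fun h => hpos h.1), if_neg hpos, if_neg hpos, if_neg (by omega : ¬ (0:Int) > 0)]

-- ===== VERDICT (by name: the statement is the Claim_ definition above) =====
theorem unoverlap_list_spec : Claim_equal_unoverlap_list := by
  intro strings hdom
  unfold Spec_unoverlap_list
  exact main_eq strings hdom
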